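-- pv_equiv track=rewrite | github.com/leechi2/LCL_WORLD | week8 work1.py | solution
-- ===== SOURCE A (Python) =====
-- def solution(N):
--     answer = 3
--     x= 2
--     y =0
--     if N==0:
--         answer = 1
--         return answer
--     if N == 1:
--         answer = 3
--         return answer
--
--     for i in range(N-1):
--         temp = x//2
--         x += 2*y
--         y = temp
--         answer += x
--
--     return answer
-- ===== SOURCE B (Python) =====
-- def _fib_pair(n):
--     # (F(n), F(n+1)) by fast doubling, n >= 0
--     if n == 0:
--         return (0, 1)
--     a, b = _fib_pair(n >> 1)
--     c = a * (2 * b - a)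
--     d = a * a + b * b
--     if n & 1:
--         return (d, c + d)
--     return (c, d)
--
-- def solution(N):
--     return 2 * _fib_pair(N + 2)[0] - 1
-- ===== Notes on version B (the rewrite author's own statement) =====
-- stated objective: faster
-- what changed: replaced the O(N) accumulation loop by the closed form 2*Fib(N+2)-1 computed with fast-doubling recursion; Pre_ restricts to the natural domain N >= 0 (a count of terms): for negative N the loop body never runs and A returns its leftover initial value 3
-- outside the precondition, e.g. on solution(-1): A returns 3, B returns 1
import Mathlib
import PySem

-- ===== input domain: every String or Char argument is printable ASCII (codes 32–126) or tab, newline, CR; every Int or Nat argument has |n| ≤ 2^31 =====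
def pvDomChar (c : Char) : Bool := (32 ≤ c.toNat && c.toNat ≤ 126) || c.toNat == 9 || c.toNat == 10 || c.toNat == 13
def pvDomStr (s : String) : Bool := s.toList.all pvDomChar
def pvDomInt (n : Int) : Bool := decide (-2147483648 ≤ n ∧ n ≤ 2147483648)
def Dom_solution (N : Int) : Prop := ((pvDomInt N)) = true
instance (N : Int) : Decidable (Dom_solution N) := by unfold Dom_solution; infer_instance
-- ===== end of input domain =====

-- B replaces A's O(N) accumulation loop by the closed form 2*Fib(N+2)-1 computed with fast doubling.


-- ===== PORT A =====
-- literal transliteration of A: the for-loop over range(N-1) as a foldl over pyRange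
-- with state (answer, x, y).
def solution (N : Int) : Int :=
  if N == 0 then 1
  else if N == 1 then 3
  else
    let st := (PySem.List.pyRange 0 (N - 1) 1).foldl
      (fun (st : Int × Int × Int) _ =>
        let temp := PySem.Int.floordiv st.2.1 2
        let x := st.2.1 + 2 * st.2.2
        (st.1 + x, x, temp))
      (3, 2, 0)
    st.1

-- ===== PORT B =====
-- fast doubling on Nat: Source B's _fib_pair is only ever reached with n ≥ 0 inside Pre_,
-- where Python's n >> 1 is n / 2 and n & 1 is n % 2; (F n, F (n+1)).
def fibPair (n : Nat) : Int × Int :=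
  if h : n = 0 then (0, 1)
  else
    let p := fibPair (n / 2)
    let c := p.1 * (2 * p.2 - p.1)
    let d := p.1 * p.1 + p.2 * p.2
    if n % 2 = 1 then (d, c + d) else (c, d)
decreasing_by exact Nat.div_lt_self (Nat.pos_of_ne_zero h) (by omega)

def solution_alt (N : Int) : Int := 2 * (fibPair (N + 2).toNat).1 - 1

-- ===== PRECONDITION & SPEC =====
-- Pre_ restricts to the natural domain N ≥ 0 (N counts terms of the sequence); for
-- negative N the loop body of A never runs and it returns its leftover initial value 3.
def Pre_solution (N : Int) : Prop := 0 ≤ N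
instance (N : Int) : Decidable (Pre_solution N) := by unfold Pre_solution; infer_instance
def pvWitness_solution : Int := (5)

def Spec_solution (N : Int) (out : Int) : Prop := out = solution_alt N
instance (N : Int) (out : Int) : Decidable (Spec_solution N out) := by unfold Spec_solution; infer_instance

-- ===== CLAIM (what is proved, stated in full; the proofs are below) =====
def Claim_equal_solution : Prop := ∀ (N : Int), Dom_solution N → Pre_solution N → Spec_solution N (solution N)

-- ===== LEMMAS AND PROOFS =====

-- fast doubling computes Fibonacci pairs
theorem fibPair_eq (n : Nat) : fibPair n = ((Nat.fib n : Int), (Nat.fib (n + 1) : Int)) := by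
  induction n using Nat.strong_induction_on with
  | _ n ih =>
    rw [fibPair]
    by_cases h : n = 0
    · simp [h]
    · have hlt : n / 2 < n := Nat.div_lt_self (Nat.pos_of_ne_zero h) (by omega)
      simp only [h, dite_false, ih _ hlt]
      rcases Nat.even_or_odd n with he | ho
      · obtain ⟨m, hm⟩ := he
        have h2 : n = 2 * m := by omega
        subst h2
        have hmod : (2 * m) % 2 = 1 ↔ False := iff_false_intro (by simp [Nat.mul_mod_right])
        have hm2 : (2 * m) / 2 = m := Nat.mul_div_cancel_left m (by norm_num)
        simp only [hmod, if_false, hm2]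
        have e1 : Nat.fib (2 * m) = Nat.fib m * (2 * Nat.fib (m + 1) - Nat.fib m) :=
          Nat.fib_two_mul m
        have e2 : Nat.fib (2 * m + 1) = Nat.fib (m + 1) ^ 2 + Nat.fib m ^ 2 :=
          Nat.fib_two_mul_add_one m
        have hsub : ((2 * Nat.fib (m + 1) - Nat.fib m : Nat) : Int)
            = 2 * (Nat.fib (m + 1) : Int) - (Nat.fib m : Int) := by
          have := Nat.fib_le_fib_succ (n := m); omega
        have e1' : ((Nat.fib (2 * m) : Int))
            = (Nat.fib m : Int) * (2 * (Nat.fib (m + 1) : Int) - (Nat.fib m : Int)) := by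
          rw [e1, Nat.cast_mul, hsub]
        simp only [Prod.mk.injEq]
        refine ⟨e1'.symm, ?_⟩
        push_cast [e2]; ring
      · obtain ⟨m, hm⟩ := ho
        subst hm
        have hmod : (2 * m + 1) % 2 = 1 := by omega
        have hm2 : (2 * m + 1) / 2 = m := by omega
        simp only [hmod, if_true, hm2]
        have e1 : Nat.fib (2 * m) = Nat.fib m * (2 * Nat.fib (m + 1) - Nat.fib m) :=
          Nat.fib_two_mul m
        have e2 : Nat.fib (2 * m + 1) = Nat.fib (m + 1) ^ 2 + Nat.fib m ^ 2 :=
          Nat.fib_two_mul_add_one m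
        have e3 : Nat.fib (2 * m + 1 + 1) = Nat.fib (2 * m) + Nat.fib (2 * m + 1) := by
          rw [Nat.fib_add_two]
        have hsub : ((2 * Nat.fib (m + 1) - Nat.fib m : Nat) : Int)
            = 2 * (Nat.fib (m + 1) : Int) - (Nat.fib m : Int) := by
          have := Nat.fib_le_fib_succ (n := m); omega
        have e1' : ((Nat.fib (2 * m) : Int))
            = (Nat.fib m : Int) * (2 * (Nat.fib (m + 1) : Int) - (Nat.fib m : Int)) := by
          rw [e1, Nat.cast_mul, hsub]
        simp only [Prod.mk.injEq]
        constructor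
        · push_cast [e2]; ring
        · rw [e3, Nat.cast_add, e1']
          push_cast [e2]; ring

-- the loop's step, named for the invariant proof
def stepA (st : Int × Int × Int) : Int × Int × Int :=
  (st.1 + (st.2.1 + 2 * st.2.2), st.2.1 + 2 * st.2.2, PySem.Int.floordiv st.2.1 2)

-- the fold ignores the list elements: it only iterates stepA length-many times
theorem foldl_stepA (l : List Int) (s : Int × Int × Int) :
    l.foldl (fun (st : Int × Int × Int) _ =>
        let temp := PySem.Int.floordiv st.2.1 2
        let x := st.2.1 + 2 * st.2.2
        (st.1 + x, x, temp)) s = stepA^[l.length] s := by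
  induction l generalizing s with
  | nil => rfl
  | cons a t ih =>
    rw [List.length_cons, Function.iterate_succ_apply, List.foldl_cons]
    exact ih (stepA s)

-- loop invariant: after m iterations the state is (2·F(m+3)−1, 2·F(m+1), F(m))
theorem stepA_iter (m : Nat) :
    stepA^[m] (3, 2, 0) =
      (2 * (Nat.fib (m + 3) : Int) - 1, 2 * (Nat.fib (m + 1) : Int), (Nat.fib m : Int)) := by
  induction m with
  | zero => simp [Nat.fib]
  | succ k ih =>
    rw [Function.iterate_succ_apply', ih]
    simp only [stepA]
    have hdiv : PySem.Int.floordiv (2 * (Nat.fib (k + 1) : Int)) 2 = (Nat.fib (k + 1) : Int) := by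
      rw [PySem.Int.floordiv_eq_ediv_of_pos (by omega)]
      omega
    rw [hdiv]
    have f1 : Nat.fib (k + 1 + 1) = Nat.fib k + Nat.fib (k + 1) := by
      rw [Nat.fib_add_two]
    have f2 : Nat.fib (k + 1 + 3) = Nat.fib (k + 2) + Nat.fib (k + 3) := by
      rw [show k + 1 + 3 = (k + 2) + 2 by ring, Nat.fib_add_two]
    have f3 : Nat.fib (k + 3) = Nat.fib (k + 1) + Nat.fib (k + 2) := by
      rw [show k + 3 = (k + 1) + 2 by ring, Nat.fib_add_two]
    refine Prod.ext ?_ (Prod.ext ?_ ?_) <;> simp <;> push_cast [f1, f2, f3] <;> ring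

-- ===== VERDICT (by name: the statement is the Claim_ definition above) =====
theorem solution_spec : Claim_equal_solution := by
  intro N _ hpre
  have hpre' : 0 ≤ N := hpre
  unfold Spec_solution solution solution_alt
  by_cases h0 : N = 0
  · subst h0
    rw [show ((0 : Int) + 2).toNat = 2 from rfl, fibPair_eq]
    decide
  · by_cases h1 : N = 1
    · subst h1
      rw [show ((1 : Int) + 2).toNat = 3 from rfl, fibPair_eq]
      decide
    · simp only [beq_iff_eq, h0, h1, if_false]
      rw [foldl_stepA, PySem.List.length_pyRange_one, stepA_iter, fibPair_eq]
      have hN : (N - 1 - 0).toNat + 3 = (N + 2).toNat := by omega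
      rw [hN]
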